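-- pv_equiv track=rewrite | github.com/DrMaester/AdventOfCode | 2018/09_01.py | getNextIndex
-- ===== SOURCE A (Python) =====
-- def getNextIndex(index, circle, change):
--     newIndex = index + change
--     if newIndex < 0:
--         return getNextIndex(len(circle), circle, newIndex)
--     elif newIndex > len(circle) -1:
--         return getNextIndex(0, circle, newIndex - len(circle))
--     else:
--         return newIndex
-- ===== SOURCE B (Python) =====
-- def getNextIndex(index, circle, change):
--     # closed form: Python's % with a positive modulus already wraps both directions
--     return (index + change) % len(circle)
-- ===== Notes on version B (the rewrite author's own statement) =====
-- stated objective: simpler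
-- what changed: Replaces A's recursive repeated add/subtract-len wraparound with the single closed-form modulo expression (index+change) % len(circle).
-- outside the precondition, e.g. on getNextIndex(0, [0], 950): A returns 0, B returns 0
import Mathlib
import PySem

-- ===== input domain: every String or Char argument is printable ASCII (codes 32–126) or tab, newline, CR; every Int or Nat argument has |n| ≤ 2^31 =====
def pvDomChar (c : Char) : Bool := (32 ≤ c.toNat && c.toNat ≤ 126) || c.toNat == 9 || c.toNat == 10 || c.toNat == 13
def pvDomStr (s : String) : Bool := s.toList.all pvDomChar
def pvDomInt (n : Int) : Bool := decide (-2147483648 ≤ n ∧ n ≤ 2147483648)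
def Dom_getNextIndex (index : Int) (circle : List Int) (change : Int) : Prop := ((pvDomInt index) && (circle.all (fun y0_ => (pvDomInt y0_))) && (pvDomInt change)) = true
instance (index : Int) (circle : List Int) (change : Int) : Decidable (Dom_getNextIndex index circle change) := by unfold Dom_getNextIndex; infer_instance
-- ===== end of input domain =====

-- B replaces A's recursive repeated add/subtract-len wraparound with a single closed-form modulo (simpler).


-- ===== PORT A =====
-- A is recursive and does not terminate on an empty circle, so the port carries a fuel
-- parameter; fuel (index+change).natAbs + 1 is proved sufficient on Pre_ (fuel exhaustion
-- is unreachable there), so on Pre_ this computes exactly what A computes.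
def getNextIndexFuel : Nat → Int → List Int → Int → Int
  | 0, index, _, change => index + change   -- unreachable under Pre_
  | f + 1, index, circle, change =>
    let newIndex := index + change
    if newIndex < 0 then
      getNextIndexFuel f (circle.length : Int) circle newIndex
    else if newIndex > (circle.length : Int) - 1 then
      getNextIndexFuel f 0 circle (newIndex - (circle.length : Int))
    else
      newIndex

def getNextIndex (index : Int) (circle : List Int) (change : Int) : Int :=
  getNextIndexFuel ((index + change).natAbs + 1) index circle change

-- ===== PORT B =====
def getNextIndex_alt (index : Int) (circle : List Int) (change : Int) : Int :=
  PySem.Int.mod (index + change) (circle.length : Int)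

-- ===== PRECONDITION & SPEC =====
-- Pre_ excludes the empty circle (A recurses forever / RecursionError, B's % raises
-- ZeroDivisionError) and offsets large enough that A's recursion depth approaches
-- Python's recursion limit (A raises RecursionError around depth ~997); the bound
-- 900·len keeps a safety margin, so it also excludes some large offsets on which A
-- still returns (see cites).
def Pre_getNextIndex (index : Int) (circle : List Int) (change : Int) : Prop :=
  circle ≠ [] ∧ (index + change).natAbs ≤ 900 * circle.length
instance (index : Int) (circle : List Int) (change : Int) : Decidable (Pre_getNextIndex index circle change) := by unfold Pre_getNextIndex; infer_instance

def pvWitness_getNextIndex : Int × List Int × Int := (2, [10, 20, 30], -7)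

def Spec_getNextIndex (index : Int) (circle : List Int) (change : Int) (out : Int) : Prop := out = getNextIndex_alt index circle change
instance (index : Int) (circle : List Int) (change : Int) (out : Int) : Decidable (Spec_getNextIndex index circle change out) := by unfold Spec_getNextIndex; infer_instance

-- ===== CLAIM (what is proved, stated in full; the proofs are below) =====
def Claim_equal_getNextIndex : Prop := ∀ (index : Int) (circle : List Int) (change : Int), Dom_getNextIndex index circle change → Pre_getNextIndex index circle change → Spec_getNextIndex index circle change (getNextIndex index circle change)

-- ===== LEMMAS AND PROOFS =====

-- With enough fuel and a nonempty circle, A's recursion computes (index+change) % len.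
theorem getNextIndexFuel_eq_emod (f : Nat) :
    ∀ (index change : Int) (circle : List Int), circle ≠ [] →
      (index + change).natAbs < f →
      getNextIndexFuel f index circle change = (index + change) % (circle.length : Int) := by
  induction f with
  | zero => intro _ _ _ _ h; omega
  | succ f ih =>
    intro index change circle hne hf
    have hlen : 0 < (circle.length : Int) := by
      have : circle.length ≠ 0 := by simpa using List.length_pos_of_ne_nil hne |>.ne'
      omega
    simp only [getNextIndexFuel]
    by_cases hneg : index + change < 0
    · rw [if_pos hneg]
      by_cases h2 : (circle.length : Int) + (index + change) < 0
      · -- still negative after one wrap: use the IH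
        have : ((circle.length : Int) + (index + change)).natAbs < f := by omega
        rw [ih _ _ _ hne this]
        have e : (circle.length : Int) + (index + change)
            = (index + change) + (circle.length : Int) * 1 := by ring
        rw [e, Int.add_mul_emod_self_left]
      · -- one more step lands in range: unfold one extra level of fuel
        obtain ⟨f', rfl⟩ : ∃ f', f = f' + 1 := ⟨f - 1, by omega⟩
        have hm0 : 0 ≤ (circle.length : Int) + (index + change) := by omega
        simp only [getNextIndexFuel]
        rw [if_neg (by omega), if_neg (by omega)]
        have e : (circle.length : Int) + (index + change)
            = (index + change) + (circle.length : Int) * 1 := by ring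
        rw [show (index + change) % (circle.length : Int)
              = ((circle.length : Int) + (index + change)) % (circle.length : Int) by
            rw [e, Int.add_mul_emod_self_left]]
        exact (Int.emod_eq_of_lt hm0 (by omega)).symm
    · by_cases hbig : index + change > (circle.length : Int) - 1
      · rw [if_neg hneg, if_pos hbig]
        have : (0 + (index + change - (circle.length : Int))).natAbs < f := by omega
        rw [ih _ _ _ hne this]
        have e : (0 : Int) + (index + change - (circle.length : Int))
            = (index + change) + (circle.length : Int) * (-1) := by ring
        rw [e, Int.add_mul_emod_self_left]
      · rw [if_neg hneg, if_neg hbig]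
        exact (Int.emod_eq_of_lt (by omega) (by omega)).symm

-- ===== VERDICT (by name: the statement is the Claim_ definition above) =====
theorem getNextIndex_spec : Claim_equal_getNextIndex := by
  intro index circle change _ hpre
  obtain ⟨hne, _⟩ := hpre
  have hlen : 0 < (circle.length : Int) := by
    have : circle.length ≠ 0 := by simpa using List.length_pos_of_ne_nil hne |>.ne'
    omega
  unfold Spec_getNextIndex getNextIndex getNextIndex_alt
  rw [getNextIndexFuel_eq_emod _ _ _ _ hne (by omega),
    PySem.Int.mod_eq_emod_of_pos hlen]
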